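-- pv_equiv track=rewrite | github.com/open-cu/code-cheating | course/1/subject_python/M/40501-39158.py | duolingo
-- ===== SOURCE A (Python) =====
-- def duolingo(numbers):
--
--     cnt_streak = 0
--     streaks = []
--
--     for i in range(len(numbers)):
--         if numbers[i] == numbers[i - 1] + 1 or i == 0:
--             cnt_streak += 1
--         else:
--             streaks.append(cnt_streak)
--             cnt_streak = 1
--
--     if cnt_streak > 0:
--         streaks.append(cnt_streak)
--
--     return len(streaks), streaks
-- ===== SOURCE B (Python) =====
-- def duolingo(numbers):
--     if not numbers:
--         return (0, [])
--     bounds = [i for i in range(len(numbers))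
--               if i == 0 or numbers[i] != numbers[i - 1] + 1]
--     bounds.append(len(numbers))
--     lengths = [bounds[k + 1] - bounds[k] for k in range(len(bounds) - 1)]
--     return (len(lengths), lengths)
-- ===== Notes on version B (the rewrite author's own statement) =====
-- stated objective: alternative
-- what changed: Replaces A's running-counter accumulator loop by a boundary-index scan: collect the start index of each streak, append len(numbers) as a sentinel, and take consecutive differences of the boundary list.
import Mathlib
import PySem

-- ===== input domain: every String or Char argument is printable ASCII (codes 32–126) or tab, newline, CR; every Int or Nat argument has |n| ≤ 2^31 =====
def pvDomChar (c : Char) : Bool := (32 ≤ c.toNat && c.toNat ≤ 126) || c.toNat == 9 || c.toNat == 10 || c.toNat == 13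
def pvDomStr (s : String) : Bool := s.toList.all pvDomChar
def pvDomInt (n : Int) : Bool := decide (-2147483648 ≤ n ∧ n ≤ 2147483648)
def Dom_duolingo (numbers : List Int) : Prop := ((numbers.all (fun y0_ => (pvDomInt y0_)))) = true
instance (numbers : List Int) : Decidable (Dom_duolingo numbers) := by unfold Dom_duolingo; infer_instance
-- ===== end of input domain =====

-- B replaces A's running-counter loop by a boundary-index scan (collect streak start indices,
-- append a sentinel, take consecutive differences); objective: alternative decomposition, same cost.

-- ===== PORT A =====
def duolingo (numbers : List Int) : Int × List Int :=
  let res := (PySem.List.pyRange 0 (numbers.length : Int) 1).foldl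
    (fun (s : Int × List Int) (i : Int) =>
      if (PySem.List.pyGetD numbers i 0 == PySem.List.pyGetD numbers (i - 1) 0 + 1) || (i == 0)
      then (s.1 + 1, s.2)
      else (1, s.2 ++ [s.1]))
    (0, [])
  let streaks := if res.1 > 0 then res.2 ++ [res.1] else res.2
  ((streaks.length : Int), streaks)

-- ===== PORT B =====
def duolingo_alt (numbers : List Int) : Int × List Int :=
  if numbers = [] then (0, [])
  else
    let bounds := ((PySem.List.pyRange 0 (numbers.length : Int) 1).filter
        (fun i => (i == 0) || !(PySem.List.pyGetD numbers i 0 == PySem.List.pyGetD numbers (i - 1) 0 + 1)))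
      ++ [(numbers.length : Int)]
    let lengths := (PySem.List.pyRange 0 ((bounds.length : Int) - 1) 1).map
        (fun k => PySem.List.pyGetD bounds (k + 1) 0 - PySem.List.pyGetD bounds k 0)
    ((lengths.length : Int), lengths)

-- ===== PRECONDITION & SPEC =====
def Spec_duolingo (numbers : List Int) (out : Int × List Int) : Prop := out = duolingo_alt numbers
instance (numbers : List Int) (out : Int × List Int) : Decidable (Spec_duolingo numbers out) := by unfold Spec_duolingo; infer_instance

-- ===== CLAIM (what is proved, stated in full; the proofs are below) =====
def Claim_equal_duolingo : Prop := ∀ (numbers : List Int), Dom_duolingo numbers → Spec_duolingo numbers (duolingo numbers)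

-- ===== LEMMAS AND PROOFS =====

/-- `i` starts a new streak (break position); `0` always does. -/
def pvBrk (v : List Int) (i : Nat) : Bool := (i == 0) || !(v.getD i 0 == v.getD (i - 1) 0 + 1)

/-- Break positions among the first `m` indices, as integers. -/
def pvBounds (v : List Int) (m : Nat) : List Int :=
  ((List.range m).filter (pvBrk v)).map (fun (i : Nat) => (i : Int))

/-- Consecutive differences. -/
def pvDiffL : List Int → List Int
  | a :: b :: t => (b - a) :: pvDiffL (b :: t)
  | _ => []

theorem pvDiffL_concat (l : List Int) (x : Int) (h : l ≠ []) :
    pvDiffL (l ++ [x]) = pvDiffL l ++ [x - l.getLastD 0] := by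
  induction l with
  | nil => exact absurd rfl h
  | cons a t ih =>
    cases t with
    | nil => simp [pvDiffL, List.getLastD]
    | cons b t' =>
      simp only [List.cons_append, pvDiffL]
      rw [show (b :: t') ++ [x] = b :: (t' ++ [x]) from rfl] at *
      have := ih (by simp)
      simp at this ⊢
      simpa [List.getLastD] using this

theorem pvBounds_succ (v : List Int) (m : Nat) :
    pvBounds v (m + 1) = pvBounds v m ++ (if pvBrk v m then [(m : Int)] else []) := by
  unfold pvBounds
  rw [List.range_succ, List.filter_append, List.map_append]
  by_cases h : pvBrk v m <;> simp [h]

theorem pvBounds_ne_nil (v : List Int) (m : Nat) (hm : 1 ≤ m) : pvBounds v m ≠ [] := by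
  apply List.ne_nil_of_mem (a := (0 : Int))
  unfold pvBounds
  simp only [List.mem_map, List.mem_filter, List.mem_range]
  exact ⟨0, ⟨hm, by simp [pvBrk]⟩, rfl⟩

theorem pvBounds_lt (v : List Int) (m : Nat) {x : Int} (hx : x ∈ pvBounds v m) : x < (m : Int) := by
  unfold pvBounds at hx
  simp only [List.mem_map, List.mem_filter, List.mem_range] at hx
  obtain ⟨i, ⟨hi, _⟩, rfl⟩ := hx
  exact_mod_cast hi

theorem pvGetLastD_mem (l : List Int) (h : l ≠ []) (d : Int) : l.getLastD d ∈ l := by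
  induction l with
  | nil => exact absurd rfl h
  | cons a t ih =>
    cases t with
    | nil => simp [List.getLastD]
    | cons b t' =>
      have : (a :: b :: t').getLastD d = (b :: t').getLastD d := by
        simp [List.getLastD]
      rw [this]
      exact List.mem_cons_of_mem a (ih (by simp))

/-- A's loop condition at an index `i ≥ 1` is the negation of `pvBrk`. -/
theorem pvCondA (v : List Int) (i : Nat) (hi : 1 ≤ i) :
    ((PySem.List.pyGetD v (i : Int) 0 == PySem.List.pyGetD v ((i : Int) - 1) 0 + 1) || ((i : Int) == 0))
      = !(pvBrk v i) := by
  have hne0 : i ≠ 0 := by omega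
  have h1 : ((i : Int) - 1) = ((i - 1 : Nat) : Int) := by omega
  have h0 : ((i : Int) == 0) = false := by
    simp only [beq_eq_false_iff_ne, ne_eq]
    omega
  rw [h1, h0]
  simp [pvBrk, hne0]

/-- B's filter condition at a natural index equals `pvBrk`. -/
theorem pvCondB (v : List Int) (i : Nat) :
    (((i : Int) == 0) || !(PySem.List.pyGetD v (i : Int) 0 == PySem.List.pyGetD v ((i : Int) - 1) 0 + 1))
      = pvBrk v i := by
  cases Nat.eq_zero_or_pos i with
  | inl h => subst h; simp [pvBrk]
  | inr h =>
    have hne0 : i ≠ 0 := by omega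
    have h1 : ((i : Int) - 1) = ((i - 1 : Nat) : Int) := by omega
    have h0 : ((i : Int) == 0) = false := by simp only [beq_eq_false_iff_ne, ne_eq]; omega
    rw [h1, h0]
    simp [pvBrk, hne0]

/-- Invariant of A's loop after the first `m ≥ 1` iterations. -/
theorem pvA_inv (v : List Int) (m : Nat) (hm : 1 ≤ m) :
    (PySem.List.pyRange 0 (m : Int) 1).foldl
      (fun (s : Int × List Int) (i : Int) =>
        if (PySem.List.pyGetD v i 0 == PySem.List.pyGetD v (i - 1) 0 + 1) || (i == 0)
        then (s.1 + 1, s.2)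
        else (1, s.2 ++ [s.1]))
      (0, [])
    = ((m : Int) - (pvBounds v m).getLastD 0, pvDiffL (pvBounds v m)) := by
  induction m, hm using Nat.le_induction with
  | base =>
    have hr : PySem.List.pyRange 0 ((1 : Nat) : Int) 1 = [0] := by
      simpa using PySem.List.pyRange_one_singleton (a := 0)
    have hb : pvBounds v 1 = [0] := by
      unfold pvBounds
      simp [List.range_succ, pvBrk]
    rw [hr, hb]
    simp [pvDiffL, List.getLastD]
  | succ m hm ih =>
    have hcast : ((m + 1 : Nat) : Int) = (m : Int) + 1 := by push_cast; ring
    rw [hcast, PySem.List.pyRange_one_succ_right (a := 0) (b := (m : Int)) (by omega),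
      List.foldl_append, ih]
    simp only [List.foldl]
    rw [pvCondA v m hm, pvBounds_succ]
    by_cases h : pvBrk v m
    · have hne := pvBounds_ne_nil v m hm
      simp [h, pvDiffL_concat _ _ hne]
    · simp [h]
      omega

theorem pvAux (l : List Int) :
    (List.range (l.length - 1)).map (fun k => l.getD (k + 1) 0 - l.getD k 0) = pvDiffL l := by
  induction l with
  | nil => simp [pvDiffL]
  | cons a t ih =>
    cases t with
    | nil => simp [pvDiffL]
    | cons b t' =>
      simp only [pvDiffL]
      rw [show (a :: b :: t').length - 1 = t'.length + 1 from rfl, List.range_succ_eq_map,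
        List.map_cons, List.map_map]
      refine congrArg₂ List.cons (by simp [List.getD]) ?_
      rw [show ((b :: t').length - 1) = t'.length from rfl] at ih
      rw [← ih]
      apply List.map_congr_left
      intro k _
      simp [List.getD]

/-- The consecutive-difference map of B equals `pvDiffL`. -/
theorem pvMapDiff (l : List Int) :
    (PySem.List.pyRange 0 ((l.length : Int) - 1) 1).map
        (fun k => PySem.List.pyGetD l (k + 1) 0 - PySem.List.pyGetD l k 0)
      = pvDiffL l := by
  cases l with
  | nil =>
    rw [show ((([] : List Int).length : Int) - 1) = -1 by simp,
      PySem.List.pyRange_one_eq_nil (by norm_num)]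
    rfl
  | cons a t =>
    have hcast : (((a :: t).length : Int) - 1) = ((t.length : Nat) : Int) := by
      simp
    rw [hcast, PySem.List.pyRange_zero_nat, List.map_map]
    have := pvAux (a :: t)
    rw [show ((a :: t).length - 1) = t.length from rfl] at this
    rw [← this]
    apply List.map_congr_left
    intro k _
    have h1 : ((k : Int) + 1) = ((k + 1 : Nat) : Int) := by push_cast; ring
    simp only [Function.comp_apply, h1, PySem.List.pyGetD_natCast]

/-- B's break-position filter over the integer range is `pvBounds`. -/
theorem pvFilterBounds (v : List Int) :
    (PySem.List.pyRange 0 (v.length : Int) 1).filter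
        (fun i => (i == 0) || !(PySem.List.pyGetD v i 0 == PySem.List.pyGetD v (i - 1) 0 + 1))
      = pvBounds v v.length := by
  rw [PySem.List.pyRange_zero_nat, List.filter_map]
  unfold pvBounds
  have h : List.filter
      ((fun i => (i == 0) || !(PySem.List.pyGetD v i 0 == PySem.List.pyGetD v (i - 1) 0 + 1))
        ∘ (fun (k : Nat) => (k : Int))) (List.range v.length)
      = List.filter (pvBrk v) (List.range v.length) :=
    List.filter_congr (fun i _ => pvCondB v i)
  rw [h]

-- ===== VERDICT (by name: the statement is the Claim_ definition above) =====
theorem duolingo_spec : Claim_equal_duolingo := by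
  intro numbers _
  unfold Spec_duolingo duolingo duolingo_alt
  by_cases hnil : numbers = []
  · subst hnil
    simp [PySem.List.pyRange_one_eq_nil]
  · have hn : 1 ≤ numbers.length := List.length_pos_of_ne_nil hnil
    simp only [if_neg hnil]
    rw [pvA_inv numbers numbers.length hn]
    rw [pvFilterBounds, pvMapDiff]
    have hne := pvBounds_ne_nil numbers numbers.length hn
    have hlt : (pvBounds numbers numbers.length).getLastD 0 < (numbers.length : Int) :=
      pvBounds_lt numbers numbers.length (pvGetLastD_mem _ hne 0)
    have hpos : (0 : Int) < (numbers.length : Int) - (pvBounds numbers numbers.length).getLastD 0 := by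
      omega
    simp only [if_pos hpos]
    rw [pvDiffL_concat _ _ hne]
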